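-- pv_equiv track=rewrite | github.com/CVladim1r/0 | 11.py | count_p
-- ===== SOURCE A (Python) =====
-- def count_p(N, M, K):
--     count = 0
--
--     for i in range(1, N + 1):
--         for j in range(1, M + 1):
--             current_element = (i - 1) * M + j
--
--             # Check right neighbor
--             if j + 1 <= M:
--                 neighbor = current_element + 1
--                 if abs(current_element - neighbor) < K:
--                     count += 1
--
--             # Check bottom neighbor
--             if i + 1 <= N:
--                 neighbor = current_element + M
--                 if abs(current_element - neighbor) < K:
--                     count += 1
--
--     return count
-- ===== SOURCE B (Python) =====
-- def count_p(N, M, K):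
--     # Closed form: every right-neighbor pair has difference 1 (there are N*(M-1)),
--     # every bottom-neighbor pair has difference M (there are (N-1)*M).
--     if N < 1 or M < 1:
--         return 0
--     right = N * (M - 1) if K > 1 else 0
--     down = (N - 1) * M if K > M else 0
--     return right + down
-- ===== Notes on version B (the rewrite author's own statement) =====
-- stated objective: faster
-- what changed: Replaces the O(N*M) double loop with a closed-form count: right-neighbor pairs all have difference 1 (N*(M-1) of them) and bottom-neighbor pairs all have difference M ((N-1)*M of them), so the answer is computed arithmetically in O(1).
import Mathlib
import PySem

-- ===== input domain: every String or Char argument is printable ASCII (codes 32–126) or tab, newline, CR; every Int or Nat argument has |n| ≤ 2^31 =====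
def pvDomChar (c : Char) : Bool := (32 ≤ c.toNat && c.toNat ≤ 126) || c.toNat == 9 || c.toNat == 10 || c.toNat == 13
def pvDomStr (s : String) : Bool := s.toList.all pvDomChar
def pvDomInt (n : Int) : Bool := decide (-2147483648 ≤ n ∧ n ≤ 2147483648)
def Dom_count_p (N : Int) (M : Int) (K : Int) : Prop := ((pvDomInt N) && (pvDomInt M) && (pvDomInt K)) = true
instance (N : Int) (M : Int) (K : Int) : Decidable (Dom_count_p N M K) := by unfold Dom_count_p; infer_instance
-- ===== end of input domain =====

-- B replaces A's double loop over the grid by a closed-form count (right-neighbor pairs differ by 1, bottom-neighbor pairs by M).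

-- ===== PORT A =====
def count_p (N : Int) (M : Int) (K : Int) : Int :=
  (PySem.List.pyRange 1 (N + 1) 1).foldl (fun count i =>
    (PySem.List.pyRange 1 (M + 1) 1).foldl (fun count j =>
      let current_element := (i - 1) * M + j
      let count := if j + 1 ≤ M then
          (if |current_element - (current_element + 1)| < K then count + 1 else count)
        else count
      if i + 1 ≤ N then
        (if |current_element - (current_element + M)| < K then count + 1 else count)
      else count) count) 0

-- ===== PORT B =====
def count_p_alt (N : Int) (M : Int) (K : Int) : Int :=
  if N < 1 ∨ M < 1 then 0
  else (if K > 1 then N * (M - 1) else 0) + (if K > M then (N - 1) * M else 0)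

-- ===== PRECONDITION & SPEC =====
def Spec_count_p (N : Int) (M : Int) (K : Int) (out : Int) : Prop := out = count_p_alt N M K
instance (N : Int) (M : Int) (K : Int) (out : Int) : Decidable (Spec_count_p N M K out) := by unfold Spec_count_p; infer_instance

-- ===== CLAIM (what is proved, stated in full; the proofs are below) =====
def Claim_equal_count_p : Prop := ∀ (N : Int) (M : Int) (K : Int), Dom_count_p N M K → Spec_count_p N M K (count_p N M K)

-- ===== LEMMAS AND PROOFS =====

-- One row of A's double loop (M ≥ 1): it adds the row's contribution to the accumulator.
theorem count_p_row (N M K i c : Int) (hM : 1 ≤ M) :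
    (PySem.List.pyRange 1 (M + 1) 1).foldl (fun count j =>
      let current_element := (i - 1) * M + j
      let count := if j + 1 ≤ M then
          (if |current_element - (current_element + 1)| < K then count + 1 else count)
        else count
      if i + 1 ≤ N then
        (if |current_element - (current_element + M)| < K then count + 1 else count)
      else count) c
    = c + ((if 1 < K then M - 1 else 0) + (if i + 1 ≤ N ∧ M < K then M else 0)) := by
  have hbody : ∀ (count j : Int), j ∈ PySem.List.pyRange 1 (M + 1) 1 →
      (let current_element := (i - 1) * M + j
       let count := if j + 1 ≤ M then
           (if |current_element - (current_element + 1)| < K then count + 1 else count)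
         else count
       if i + 1 ≤ N then
         (if |current_element - (current_element + M)| < K then count + 1 else count)
       else count)
      = count + ((if j + 1 ≤ M ∧ 1 < K then 1 else 0) + (if i + 1 ≤ N ∧ M < K then 1 else 0)) := by
    intro count j hj
    have h1 : |(i - 1) * M + j - ((i - 1) * M + j + 1)| = 1 := by
      have h : (i - 1) * M + j - ((i - 1) * M + j + 1) = -1 := by ring
      rw [h]; decide
    have h2 : |(i - 1) * M + j - ((i - 1) * M + j + M)| = M := by
      have h : (i - 1) * M + j - ((i - 1) * M + j + M) = -M := by ring
      rw [h, abs_neg, abs_of_nonneg (by omega)]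
    simp only [h1, h2]
    split_ifs <;> omega
  rw [PySem.List.foldl_congr_mem _ _ _ _ hbody, PySem.List.foldl_add, List.sum_map_add]
  have hright : ((PySem.List.pyRange 1 (M + 1) 1).map
      (fun j => if j + 1 ≤ M ∧ 1 < K then (1 : Int) else 0)).sum
      = if 1 < K then M - 1 else 0 := by
    by_cases hK : 1 < K
    · rw [PySem.List.pyRange_one_succ_right hM, List.map_append, List.sum_append]
      have hall : ∀ j ∈ PySem.List.pyRange 1 M 1,
          (if j + 1 ≤ M ∧ 1 < K then (1 : Int) else 0) = 1 := by
        intro j hj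
        rw [PySem.List.mem_pyRange_one] at hj
        have hle : j + 1 ≤ M := by omega
        simp [hle, hK]
      rw [List.map_congr_left hall, List.map_const', PySem.List.length_pyRange_one,
        List.sum_replicate, nsmul_eq_mul]
      simp [hK]
      omega
    · have hall : ∀ j ∈ PySem.List.pyRange 1 (M + 1) 1,
          (if j + 1 ≤ M ∧ 1 < K then (1 : Int) else 0) = 0 := by
        intro j _; simp [hK]
      rw [List.map_congr_left hall]
      simp [hK]
  have hbot : ((PySem.List.pyRange 1 (M + 1) 1).map
      (fun _ => if i + 1 ≤ N ∧ M < K then (1 : Int) else 0)).sum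
      = if i + 1 ≤ N ∧ M < K then M else 0 := by
    rw [List.map_const', PySem.List.length_pyRange_one, List.sum_replicate, nsmul_eq_mul]
    split_ifs
    · omega
    · simp
  rw [hright, hbot]

theorem count_p_eq (N M K : Int) : count_p N M K = count_p_alt N M K := by
  unfold count_p count_p_alt
  by_cases hM : M < 1
  · -- inner range is empty: every row is a no-op
    have hin : PySem.List.pyRange 1 (M + 1) 1 = [] :=
      PySem.List.pyRange_one_eq_nil (by omega)
    rw [hin]
    simp only [List.foldl_nil]
    rw [PySem.List.foldl_ignore]
    simp [hM]
  · rw [Int.not_lt] at hM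
    by_cases hN : N < 1
    · have hout : PySem.List.pyRange 1 (N + 1) 1 = [] :=
        PySem.List.pyRange_one_eq_nil (by omega)
      rw [hout]
      simp [hN]
    · rw [Int.not_lt] at hN
      have hbody : ∀ (count i : Int), i ∈ PySem.List.pyRange 1 (N + 1) 1 →
          ((PySem.List.pyRange 1 (M + 1) 1).foldl (fun count j =>
            let current_element := (i - 1) * M + j
            let count := if j + 1 ≤ M then
                (if |current_element - (current_element + 1)| < K then count + 1 else count)
              else count
            if i + 1 ≤ N then
              (if |current_element - (current_element + M)| < K then count + 1 else count)
            else count) count)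
          = count + ((if 1 < K then M - 1 else 0) + (if i + 1 ≤ N ∧ M < K then M else 0)) := by
        intro count i _
        exact count_p_row N M K i count hM
      rw [PySem.List.foldl_congr_mem _ _ _ _ hbody, PySem.List.foldl_add, List.sum_map_add]
      have hconst : ((PySem.List.pyRange 1 (N + 1) 1).map
          (fun _ => if 1 < K then M - 1 else 0)).sum
          = if 1 < K then N * (M - 1) else 0 := by
        rw [List.map_const', PySem.List.length_pyRange_one, List.sum_replicate, nsmul_eq_mul]
        have hcast : (((N + 1 - 1).toNat : Int)) = N := by omega
        rw [hcast]
        split_ifs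
        · rfl
        · simp
      have hbot : ((PySem.List.pyRange 1 (N + 1) 1).map
          (fun i => if i + 1 ≤ N ∧ M < K then M else 0)).sum
          = if M < K then (N - 1) * M else 0 := by
        by_cases hK : M < K
        · rw [PySem.List.pyRange_one_succ_right hN, List.map_append, List.sum_append]
          have hall : ∀ i ∈ PySem.List.pyRange 1 N 1,
              (if i + 1 ≤ N ∧ M < K then M else (0 : Int)) = M := by
            intro i hi
            rw [PySem.List.mem_pyRange_one] at hi
            have hle : i + 1 ≤ N := by omega
            simp [hle, hK]
          rw [List.map_congr_left hall, List.map_const', PySem.List.length_pyRange_one,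
            List.sum_replicate, nsmul_eq_mul]
          have hlast : ¬ (N + 1 ≤ N ∧ M < K) := by omega
          have hcast : (((N - 1).toNat : Int)) = N - 1 := by omega
          rw [if_pos hK]
          simp only [List.map_cons, List.map_nil, List.sum_cons, List.sum_nil, if_neg hlast,
            add_zero]
          rw [hcast]
        · have hall : ∀ i ∈ PySem.List.pyRange 1 (N + 1) 1,
              (if i + 1 ≤ N ∧ M < K then M else (0 : Int)) = 0 := by
            intro i _; simp [hK]
          rw [List.map_congr_left hall]
          simp [hK]
      rw [hconst, hbot]
      have hnot : ¬ (N < 1 ∨ M < 1) := by omega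
      simp only [hnot, if_false]
      split_ifs <;> ring

-- ===== VERDICT (by name: the statement is the Claim_ definition above) =====
theorem count_p_spec : Claim_equal_count_p := by
  intro N M K _
  exact count_p_eq N M K
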